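-- pv_equiv track=rewrite | github.com/wizard1203/FuseFL | utils.py | seq_map_values
-- ===== SOURCE A (Python) =====
-- def seq_map_values(A, range_end):
--     # Calculate the total number of elements to distribute
--     total_elements = range_end + 1
--     num_values = len(A)
--
--     # Calculate the number of elements to assign to each value in A
--     elements_per_value = total_elements // num_values
--
--     # Handle any remaining elements that don't fit evenly
--     remaining_elements = total_elements % num_values
--
--     # Initialize the mapping dictionary
--     mapping = {}
--     current_index = 0
--
--     for value in A:
--         # Calculate the number of elements for this value
--         num_elements = elements_per_value + (1 if remaining_elements > 0 else 0)
--         remaining_elements -= 1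
--
--         # Map each element in the range to the current value
--         for i in range(current_index, current_index + num_elements):
--             mapping[i] = value
--
--         # Update the index for the next value
--         current_index += num_elements
--
--     return mapping
-- ===== SOURCE B (Python) =====
-- def seq_map_values(A, range_end):
--     # Flat single pass: compute each index's bucket arithmetically instead of
--     # nested per-value block loops.  divmod is evaluated unconditionally so an
--     # empty A raises ZeroDivisionError exactly like the original.
--     q, r = divmod(range_end + 1, len(A))
--     boundary = r * (q + 1)
--     mapping = {}
--     for i in range(range_end + 1):
--         if i < boundary:
--             bucket = i // (q + 1)
--         else:
--             bucket = r + (i - boundary) // q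
--         mapping[i] = A[bucket]
--     return mapping
-- ===== Notes on version B (the rewrite author's own statement) =====
-- stated objective: alternative
-- what changed: Replaces A's nested outer-values/inner-block loop (which advances a running index and a remainder counter) by a single flat pass over the index range that computes each index's owning bucket arithmetically from one divmod.
-- outside the precondition, e.g. on seq_map_values([], 3): A raises ZeroDivisionError, B raises ZeroDivisionError
import Mathlib
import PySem

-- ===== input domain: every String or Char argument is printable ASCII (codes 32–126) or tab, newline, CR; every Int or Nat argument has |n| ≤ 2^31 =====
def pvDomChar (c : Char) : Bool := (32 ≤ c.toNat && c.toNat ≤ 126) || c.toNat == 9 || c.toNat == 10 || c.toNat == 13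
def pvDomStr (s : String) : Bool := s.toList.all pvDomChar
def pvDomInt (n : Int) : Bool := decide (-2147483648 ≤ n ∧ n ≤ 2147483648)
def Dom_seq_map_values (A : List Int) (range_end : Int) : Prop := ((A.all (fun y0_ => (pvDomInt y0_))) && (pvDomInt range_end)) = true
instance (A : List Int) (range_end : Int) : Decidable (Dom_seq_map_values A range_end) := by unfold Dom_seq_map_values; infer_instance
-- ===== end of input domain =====

-- B replaces A's outer-values/inner-block nested loop by one flat index loop that computes
-- each index's bucket arithmetically from divmod(range_end+1, len(A)) (objective: alternative).

-- ===== PORT A =====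
-- one step of A's outer 'for value in A' loop; state = (mapping, current_index, remaining_elements)
def pvStepA (epv : Int) (s : PySem.Dict Int Int × Int × Int) (value : Int) :
    PySem.Dict Int Int × Int × Int :=
  let num_elements := epv + (if s.2.2 > 0 then (1 : Int) else 0)
  ((PySem.List.pyRange s.2.1 (s.2.1 + num_elements)).foldl (fun d i => d.insert i value) s.1,
   s.2.1 + num_elements, s.2.2 - 1)

def seq_map_values (A : List Int) (range_end : Int) : List (Int × Int) :=
  let total_elements := range_end + 1
  let num_values : Int := A.length
  -- Python '//' and '%'; A = [] (ZeroDivisionError in Python) is excluded by Pre_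
  let elements_per_value := PySem.Int.floordiv total_elements num_values
  let remaining_elements := PySem.Int.mod total_elements num_values
  (A.foldl (pvStepA elements_per_value)
    (PySem.Dict.empty, 0, remaining_elements)).1.items

-- ===== PORT B =====
-- bucket of index i, as computed inside Source B's loop
def pvBucketB (q r i : Int) : Int :=
  if i < r * (q + 1) then PySem.Int.floordiv i (q + 1)
  else r + PySem.Int.floordiv (i - r * (q + 1)) q

def seq_map_values_alt (A : List Int) (range_end : Int) : List (Int × Int) :=
  -- divmod(range_end+1, len(A)); A = [] (ZeroDivisionError in Python) is excluded by Pre_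
  let q := PySem.Int.floordiv (range_end + 1) (A.length : Int)
  let r := PySem.Int.mod (range_end + 1) (A.length : Int)
  ((PySem.List.pyRange 0 (range_end + 1)).foldl
      (fun d i => d.insert i (PySem.List.pyGetD A (pvBucketB q r i) 0))
      PySem.Dict.empty).items

-- ===== PRECONDITION & SPEC =====
-- Pre_ excludes exactly A = [], where Python's '//' (A) resp. divmod (B) raises ZeroDivisionError.
def Pre_seq_map_values (A : List Int) (range_end : Int) : Prop := A ≠ []
instance (A : List Int) (range_end : Int) : Decidable (Pre_seq_map_values A range_end) := by
  unfold Pre_seq_map_values; infer_instance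

def pvWitness_seq_map_values : List Int × Int := ([10, 20, 30], 7)

def Spec_seq_map_values (A : List Int) (range_end : Int) (out : List (Int × Int)) : Prop := out = seq_map_values_alt A range_end
instance (A : List Int) (range_end : Int) (out : List (Int × Int)) : Decidable (Spec_seq_map_values A range_end out) := by unfold Spec_seq_map_values; infer_instance

-- ===== CLAIM (what is proved, stated in full; the proofs are below) =====
def Claim_equal_seq_map_values : Prop := ∀ (A : List Int) (range_end : Int), Dom_seq_map_values A range_end → Pre_seq_map_values A range_end → Spec_seq_map_values A range_end (seq_map_values A range_end)

-- ===== LEMMAS AND PROOFS =====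

-- the bucket formula of B names exactly the block of A's k-th value
lemma pvBucketB_eq (q r k i : Int) (_hr0 : 0 ≤ r)
    (hlo : q * k + min k r ≤ i)
    (hhi : i < q * k + min k r + (q + if r - k > 0 then 1 else 0)) (hk0 : 0 ≤ k) :
    pvBucketB q r i = k := by
  have hq : 0 ≤ q := by
    by_contra hq

    have hk1 : q * k ≤ (-1) * k := by
      apply mul_le_mul_of_nonneg_right _ hk0; omega
    have : min k r ≤ k := min_le_left _ _
    split_ifs at hhi <;> nlinarith
  by_cases hkr : k < r
  · have hmin : min k r = k := by omega
    rw [hmin] at hlo hhi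
    have hif : (if r - k > 0 then (1:Int) else 0) = 1 := by simp; omega
    rw [hif] at hhi
    have hin : i < r * (q + 1) := by nlinarith
    unfold pvBucketB
    rw [if_pos hin, PySem.Int.floordiv_eq_iff_of_pos (by omega)]
    constructor <;> nlinarith
  · rw [not_lt] at hkr
    have hmin : min k r = r := by omega
    rw [hmin] at hlo hhi
    have hif : (if r - k > 0 then (1:Int) else 0) = 0 := by simp; omega
    rw [hif] at hhi
    have hqpos : 0 < q := by
      rcases lt_or_eq_of_le hq with h | h
      · exact h
      · exfalso; rw [← h] at hlo hhi; omega
    have hin : ¬ i < r * (q + 1) := by nlinarith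
    unfold pvBucketB
    rw [if_neg hin]
    have : PySem.Int.floordiv (i - r * (q + 1)) q = k - r := by
      rw [PySem.Int.floordiv_eq_iff_of_pos hqpos]
      constructor <;> nlinarith
    omega

-- invariant of A's outer loop: after k values, mapping holds exactly the indices [0, q*k + min k r)
lemma pvLoopA (A : List Int) (q r : Int)
    (hr0 : 0 ≤ r) (hrn : r ≤ (A.length : Int)) :
    ∀ (l : List Int) (k : Nat) (d : PySem.Dict Int Int),
      A.drop k = l → k ≤ A.length →
      d.items = (PySem.List.pyRange 0 (q * (k : Int) + min (k : Int) r)).map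
          (fun i => (i, PySem.List.pyGetD A (pvBucketB q r i) 0)) →
      ((l.foldl (pvStepA q) (d, q * (k : Int) + min (k : Int) r, r - (k : Int))).1).items
        = (PySem.List.pyRange 0 (q * (A.length : Int) + r)).map
            (fun i => (i, PySem.List.pyGetD A (pvBucketB q r i) 0)) := by
  intro l
  induction l with
  | nil =>
    intro k d hdrop hkle hitems
    have hk : A.length ≤ k := by
      have hlen := congrArg List.length hdrop
      simp at hlen
      omega
    have hkeq : (k : Int) = (A.length : Int) := by omega
    rw [hkeq] at hitems
    have hmin : min ((A.length : Int)) r = r := by omega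
    rw [hmin] at hitems
    simpa using hitems
  | cons v tl ih =>
    intro k d hdrop hkle hitems
    have hk : k < A.length := by
      have hlen := congrArg List.length hdrop
      simp at hlen
      omega
    have hdropk := List.drop_eq_getElem_cons hk
    rw [hdrop] at hdropk
    have hpair := List.cons_eq_cons.mp hdropk.symm
    have hv : v = A[k] := hpair.1.symm
    have htl : A.drop (k + 1) = tl := hpair.2
    have hk0 : (0 : Int) ≤ (k : Int) := Int.natCast_nonneg k
    set f : Int → Int × Int := fun i => (i, PySem.List.pyGetD A (pvBucketB q r i) 0) with hf
    set ci : Int := q * (k : Int) + min (k : Int) r with hci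
    set num : Int := q + (if r - (k : Int) > 0 then 1 else 0) with hnum
    have hexp : q * ((k : Int) + 1) = q * (k : Int) + q := by ring
    have hcinext : ci + num = q * (((k : Int)) + 1) + min ((k : Int) + 1) r := by
      rw [hexp, hci, hnum]; omega
    -- one outer step
    have hstep : List.foldl (pvStepA q) (d, ci, r - (k : Int)) (v :: tl)
        = List.foldl (pvStepA q)
            ((PySem.List.pyRange ci (ci + num)).foldl (fun d i => d.insert i v) d,
             ci + num, r - (k : Int) - 1) tl := by
      rw [List.foldl_cons]; rfl
    rw [hstep]
    -- the new mapping satisfies the invariant at k+1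
    have hnext : ((PySem.List.pyRange ci (ci + num)).foldl (fun d i => d.insert i v) d).items
        = (PySem.List.pyRange 0 (ci + num)).map f := by
      by_cases hnp : 0 < num
      · have hq0 : 0 ≤ q := by rw [hnum] at hnp; split_ifs at hnp <;> omega
        have hqk : 0 ≤ q * (k : Int) := mul_nonneg hq0 hk0
        have hci0 : 0 ≤ ci := by rw [hci]; omega
        have hkeys : d.keys = PySem.List.pyRange 0 ci := by
          have hcomp : ((fun x : Int × Int => x.1) ∘
              fun i : Int => (i, PySem.List.pyGetD A (pvBucketB q r i) 0)) =
              (fun i : Int => i) := rfl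
          simp only [PySem.Dict.keys, hitems, List.map_map, hf, hcomp]
          simp
        have hfresh : ∀ a ∈ PySem.List.pyRange ci (ci + num),
            d.contains ((fun i => i) a) = false := by
          intro a ha
          rw [PySem.List.mem_pyRange_one] at ha
          rw [PySem.Dict.contains_eq_decide_mem_keys, hkeys]
          simp [PySem.List.mem_pyRange_one]
          omega
        have hnodup : ((PySem.List.pyRange ci (ci + num)).map (fun i => i)).Nodup := by
          simpa using PySem.List.nodup_pyRange_one ci (ci + num)
        have happ := PySem.Dict.items_foldl_insert_fresh
          (PySem.List.pyRange ci (ci + num)) (fun i => i) (fun _ => v) d hfresh hnodup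
        rw [happ, hitems]
        have hmapeq : (PySem.List.pyRange ci (ci + num)).map (fun a => ((fun i => i) a, v))
            = (PySem.List.pyRange ci (ci + num)).map f := by
          apply List.map_congr_left
          intro i hi
          rw [PySem.List.mem_pyRange_one] at hi
          have hb : pvBucketB q r i = (k : Int) := by
            apply pvBucketB_eq q r (k : Int) i hr0 _ _ hk0
            · rw [← hci]; exact hi.1
            · rw [← hci, ← hnum]; exact hi.2
          simp only [hf, hb]
          have : PySem.List.pyGetD A ((k : Int)) 0 = A[k] := by
            rw [PySem.List.pyGetD_eq_getElem A 0 hk0 (by exact_mod_cast hk)]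
            simp
          rw [this, hv]
        rw [hmapeq, ← List.map_append,
          ← PySem.List.pyRange_one_append 0 ci (ci + num) hci0 (by omega)]
      · rw [not_lt] at hnp
        have hnil : PySem.List.pyRange ci (ci + num) = [] :=
          PySem.List.pyRange_one_eq_nil (by omega)
        rw [hnil]
        simp only [List.foldl_nil]
        rcases eq_or_lt_of_le hnp with h0 | hneg
        · rw [hitems, h0, add_zero]
        · -- num < 0 forces q < 0, so all the index ranges so far are empty
          have hqneg : q ≤ -1 := by rw [hnum] at hneg; split_ifs at hneg <;> omega
          have hqk : q * (k : Int) ≤ (-1) * (k : Int) :=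
            mul_le_mul_of_nonneg_right (by omega) hk0
          have hci0 : ci ≤ 0 := by rw [hci]; omega
          rw [hitems, PySem.List.pyRange_one_eq_nil hci0,
            PySem.List.pyRange_one_eq_nil (by omega : ci + num ≤ 0)]
    have hrnext : r - (k : Int) - 1 = r - ((k + 1 : Nat) : Int) := by push_cast; ring
    have hcinext' : ci + num = q * ((k + 1 : Nat) : Int) + min (((k + 1 : Nat)) : Int) r := by
      rw [hcinext]; push_cast; ring_nf
    rw [hrnext]
    calc ((List.foldl (pvStepA q)
            ((PySem.List.pyRange ci (ci + num)).foldl (fun d i => d.insert i v) d,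
             ci + num, r - ((k + 1 : Nat) : Int)) tl).1).items
        = ((List.foldl (pvStepA q)
            ((PySem.List.pyRange ci (ci + num)).foldl (fun d i => d.insert i v) d,
             q * ((k + 1 : Nat) : Int) + min (((k + 1 : Nat)) : Int) r,
             r - ((k + 1 : Nat) : Int)) tl).1).items := by rw [← hcinext']
      _ = _ := by
            apply ih (k + 1) _ htl (by omega)
            rw [hnext, hcinext']

-- ===== VERDICT (by name: the statement is the Claim_ definition above) =====
theorem seq_map_values_spec : Claim_equal_seq_map_values := by
  intro A range_end _ hpre
  unfold Pre_seq_map_values at hpre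
  have hlen : 0 < A.length := List.length_pos_of_ne_nil hpre
  have hlen' : (0 : Int) < (A.length : Int) := by exact_mod_cast hlen
  unfold Spec_seq_map_values seq_map_values seq_map_values_alt
  dsimp only
  set t : Int := range_end + 1 with ht
  set q : Int := PySem.Int.floordiv t (A.length : Int) with hq
  set r : Int := PySem.Int.mod t (A.length : Int) with hr
  have hr0 : 0 ≤ r := PySem.Int.mod_nonneg t hlen'
  have hrn : r < (A.length : Int) := PySem.Int.mod_lt t hlen'
  have htqr : q * (A.length : Int) + r = t := PySem.Int.floordiv_mul_add_mod t (A.length : Int)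
  -- B's loop inserts fresh increasing keys, so its items are just the mapped range
  have hB : ((PySem.List.pyRange 0 t).foldl
      (fun d i => d.insert i (PySem.List.pyGetD A (pvBucketB q r i) 0)) PySem.Dict.empty).items
      = (PySem.List.pyRange 0 t).map (fun i => (i, PySem.List.pyGetD A (pvBucketB q r i) 0)) := by
    have happ := PySem.Dict.items_foldl_insert_fresh (PySem.List.pyRange 0 t) (fun i => i)
      (fun i => PySem.List.pyGetD A (pvBucketB q r i) 0) PySem.Dict.empty
      (by intro a _; exact PySem.Dict.contains_empty a)
      (by simpa using PySem.List.nodup_pyRange_one 0 t)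
    simpa using happ
  rw [hB]
  -- A's loop: the invariant lemma, started at k = 0 with the empty mapping
  have e1 : q * ((0 : Nat) : Int) + min ((0 : Nat) : Int) r = 0 := by
    simp; omega
  have hA := pvLoopA A q r hr0 (le_of_lt hrn) A 0 PySem.Dict.empty rfl (by omega)
    (by rw [e1, PySem.List.pyRange_one_eq_nil (le_refl (0 : Int))]
        simp [PySem.Dict.empty])
  rw [e1] at hA
  have e2 : r - ((0 : Nat) : Int) = r := by simp
  rw [e2, htqr] at hA
  exact hA
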